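-- pv_equiv track=rewrite | github.com/hoshisabi/coding-challenges | src/aoc2024/aoc2024d09p01t1.py | move_file_id
-- ===== SOURCE A (Python) =====
-- def get_free_space_loc(disk_map, max_loc):
--     filled_locs = disk_map.keys()
--     return next(
--         (i for i in range(max_loc) if i not in filled_locs),
--         max_loc + 1,
--     )
--
-- def move_file_id(file_id, disk_map, max_loc):
--     locs = []
--     for loc in disk_map.keys():
--         if disk_map[loc] == file_id:
--             locs += {loc}
--
--     for loc in locs:
--         new_loc = get_free_space_loc(disk_map, max_loc)
--         disk_map.pop(loc)
--         disk_map[new_loc] = file_id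
--
--     max_loc = max(disk_map.keys())
--     return disk_map, max_loc
-- ===== SOURCE B (Python) =====
-- def _insert_sorted(vac, loc):
--     i = 0
--     while i < len(vac) and vac[i] < loc:
--         i += 1
--     vac.insert(i, loc)
--
--
-- def move_file_id(file_id, disk_map, max_loc):
--     original = set(disk_map)
--     locs = [loc for loc, val in disk_map.items() if val == file_id]
--     vac = []   # vacated original slots inside [0, max_loc), ascending
--     ptr = 0    # slots below ptr that are not original keys are already used up
--     for loc in locs:
--         while ptr < max_loc and ptr in original:
--             ptr += 1
--         cand = ptr if ptr < max_loc else None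
--         if vac and (cand is None or vac[0] < cand):
--             new_loc = vac.pop(0)
--         elif cand is not None:
--             new_loc = cand
--             ptr = cand + 1
--         else:
--             new_loc = max_loc + 1
--         del disk_map[loc]
--         disk_map[new_loc] = file_id
--         if 0 <= loc < max_loc:
--             _insert_sorted(vac, loc)
--     return disk_map, max(disk_map.keys())
-- ===== Notes on version B (the rewrite author's own statement) =====
-- stated objective: alternative
-- what changed: B replaces A's per-move rescan of range(max_loc) from 0 with incremental state: a monotone pointer that lazily skips originally-occupied slots plus a sorted list of vacated slots, taking the smaller of the two candidates each move.
-- outside the precondition, e.g. on move_file_id(1, {}, 5): A raises ValueError, B raises ValueError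
import Mathlib
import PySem

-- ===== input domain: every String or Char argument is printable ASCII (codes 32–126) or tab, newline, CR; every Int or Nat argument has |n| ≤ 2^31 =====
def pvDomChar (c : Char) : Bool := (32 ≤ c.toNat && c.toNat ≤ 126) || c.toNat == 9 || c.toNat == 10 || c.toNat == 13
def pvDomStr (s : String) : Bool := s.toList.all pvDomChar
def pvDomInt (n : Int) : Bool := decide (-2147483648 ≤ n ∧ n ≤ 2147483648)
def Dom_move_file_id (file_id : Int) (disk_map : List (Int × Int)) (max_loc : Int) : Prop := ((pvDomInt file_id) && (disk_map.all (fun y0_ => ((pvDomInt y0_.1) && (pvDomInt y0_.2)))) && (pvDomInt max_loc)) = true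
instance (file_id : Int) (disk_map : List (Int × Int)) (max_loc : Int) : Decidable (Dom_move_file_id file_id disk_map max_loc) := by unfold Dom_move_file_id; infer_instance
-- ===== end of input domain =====

-- B replaces A's per-move rescan of range(max_loc) from 0 by a lazy pointer over originally-free
-- slots plus an incrementally maintained sorted list of vacated slots (alternative decomposition;
-- avoids rescanning). Both A and B mutate disk_map in place in Python; the equivalence proved here
-- is about the returned (dict, max) value.


-- ===== PORT A =====
def pvGetFreeSpaceLoc (disk_map : PySem.Dict Int Int) (max_loc : Int) : Int :=
  -- next((i for i in range(max_loc) if i not in filled_locs), max_loc + 1)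
  match (PySem.List.pyRange 0 max_loc 1).find? (fun i => !(disk_map.contains i)) with
  | some i => i
  | none => max_loc + 1

def move_file_id (file_id : Int) (disk_map : List (Int × Int)) (max_loc : Int) : (List (Int × Int)) × Int :=
  let d0 : PySem.Dict Int Int := PySem.Dict.mk disk_map
  -- for loc in disk_map.keys(): if disk_map[loc] == file_id: locs += {loc}
  let locs : List Int :=
    d0.keys.foldl (fun acc loc => if d0.getD loc 0 == file_id then acc ++ [loc] else acc) []
  -- for loc in locs: new_loc = get_free_space_loc(...); disk_map.pop(loc); disk_map[new_loc] = file_id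
  let d1 : PySem.Dict Int Int :=
    locs.foldl (fun d loc =>
      let new_loc := pvGetFreeSpaceLoc d max_loc
      (d.erase loc).insert new_loc file_id) d0
  -- max_loc = max(disk_map.keys())  (raises ValueError on an empty dict: excluded by Pre_)
  match PySem.List.max? d1.keys (fun k => k) with
  | some m => (d1.items, m)
  | none => (d1.items, 0)

-- ===== PORT B =====
def pvInsertSorted (vac : List Int) (loc : Int) : List Int :=
  -- _insert_sorted: walk past the elements < loc, insert loc there
  match vac with
  | [] => [loc]
  | x :: rest => if x < loc then x :: pvInsertSorted rest loc else loc :: x :: rest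

def pvScan (orig : PySem.Set Int) (max_loc ptr : Int) : Int :=
  -- while ptr < max_loc and ptr in original: ptr += 1
  if h : ptr < max_loc ∧ PySem.Set.contains orig ptr = true then pvScan orig max_loc (ptr + 1)
  else ptr
termination_by (max_loc - ptr).toNat
decreasing_by
  have := h.1
  omega

def pvStepB (file_id max_loc : Int) (orig : PySem.Set Int)
    (s : PySem.Dict Int Int × Int × List Int) (loc : Int) : PySem.Dict Int Int × Int × List Int :=
  -- body of B's for-loop over locs
  let ptr := pvScan orig max_loc s.2.1
  let cand : Option Int := if ptr < max_loc then some ptr else none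
  let res : Int × Int × List Int :=
    match s.2.2, cand with
    | v :: rest, none => (v, ptr, rest)
    | v :: rest, some c => if v < c then (v, ptr, rest) else (c, c + 1, v :: rest)
    | [], some c => (c, c + 1, [])
    | [], none => (max_loc + 1, ptr, [])
  let d := (s.1.erase loc).insert res.1 file_id
  let vac := if 0 ≤ loc ∧ loc < max_loc then pvInsertSorted res.2.2 loc else res.2.2
  (d, res.2.1, vac)

def move_file_id_alt (file_id : Int) (disk_map : List (Int × Int)) (max_loc : Int) : (List (Int × Int)) × Int :=
  let d0 : PySem.Dict Int Int := PySem.Dict.mk disk_map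
  let original : PySem.Set Int := PySem.Set.ofList d0.keys
  let locs : List Int := (d0.items.filter (fun p => p.2 == file_id)).map (fun p => p.1)
  let s := locs.foldl (pvStepB file_id max_loc original) (d0, 0, [])
  match PySem.List.max? s.1.keys (fun k => k) with
  | some m => (s.1.items, m)
  | none => (s.1.items, 0)

-- ===== PRECONDITION & SPEC =====
-- Pre_ excludes the empty dict, on which A raises ValueError (max() of an empty sequence), and
-- association lists with duplicate keys, which do not represent a Python dict input.
def Pre_move_file_id (file_id : Int) (disk_map : List (Int × Int)) (max_loc : Int) : Prop :=
  disk_map ≠ [] ∧ (disk_map.map Prod.fst).Nodup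
instance (file_id : Int) (disk_map : List (Int × Int)) (max_loc : Int) : Decidable (Pre_move_file_id file_id disk_map max_loc) := by unfold Pre_move_file_id; infer_instance

def pvWitness_move_file_id : Int × (List (Int × Int)) × Int := (1, [(0, 1), (2, 1), (3, 0)], 4)

def Spec_move_file_id (file_id : Int) (disk_map : List (Int × Int)) (max_loc : Int) (out : (List (Int × Int)) × Int) : Prop := out = move_file_id_alt file_id disk_map max_loc
instance (file_id : Int) (disk_map : List (Int × Int)) (max_loc : Int) (out : (List (Int × Int)) × Int) : Decidable (Spec_move_file_id file_id disk_map max_loc out) := by unfold Spec_move_file_id; infer_instance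

-- ===== CLAIM (what is proved, stated in full; the proofs are below) =====
def Claim_equal_move_file_id : Prop := ∀ (file_id : Int) (disk_map : List (Int × Int)) (max_loc : Int), Dom_move_file_id file_id disk_map max_loc → Pre_move_file_id file_id disk_map max_loc → Spec_move_file_id file_id disk_map max_loc (move_file_id file_id disk_map max_loc)

-- ===== LEMMAS AND PROOFS =====

-- A's loop body
def pvStepA (file_id max_loc : Int) (d : PySem.Dict Int Int) (loc : Int) : PySem.Dict Int Int :=
  let new_loc := pvGetFreeSpaceLoc d max_loc
  (d.erase loc).insert new_loc file_id

-- the invariant tying B's (dict, pointer, vacated-list) state to the dict alone;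
-- orig is the ORIGINAL key list of the dict.
def pvInv (orig : List Int) (max_loc : Int) (d : PySem.Dict Int Int) (ptr : Int) (vac : List Int) : Prop :=
  vac.Pairwise (· < ·) ∧
  (∀ v ∈ vac, 0 ≤ v ∧ v < max_loc ∧ d.contains v = false ∧ v ∈ orig) ∧
  (∀ i : Int, 0 ≤ i → i < max_loc → d.contains i = false → i ∉ orig → ptr ≤ i) ∧
  (∀ i : Int, 0 ≤ i → i < max_loc → d.contains i = false → i ∈ orig → i ∈ vac) ∧
  (∀ i : Int, ptr ≤ i → i < max_loc → i ∉ orig → d.contains i = false) ∧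
  0 ≤ ptr

theorem pv_set_contains (l : List Int) (x : Int) :
    (PySem.Set.contains (PySem.Set.ofList l) x = true) ↔ x ∈ l := by
  simp [PySem.Set.contains, PySem.Set.mem_ofList]

theorem pv_any_bne_and_beq (l : List (Int × Int)) (i k : Int) :
    (l.any fun p => !(p.1 == k) && (p.1 == i)) = (!(i == k) && l.any fun p => p.1 == i) := by
  induction l with
  | nil => simp
  | cons p t ih =>
    simp only [List.any_cons, ih]
    by_cases h : p.1 = i
    · subst h; by_cases hk : p.1 = k <;> simp [hk]
    · have hpi : (p.1 == i) = false := beq_eq_false_iff_ne.2 h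
      simp [hpi]

theorem pv_contains_erase (d : PySem.Dict Int Int) (k i : Int) :
    (d.erase k).contains i = (d.contains i && !(i == k)) := by
  cases d with
  | mk l =>
    simp only [PySem.Dict.erase, PySem.Dict.contains, List.any_filter]
    rw [pv_any_bne_and_beq]
    exact Bool.and_comm _ _

theorem pv_contains_step (d : PySem.Dict Int Int) (loc nl fid i : Int) :
    (((d.erase loc).insert nl fid).contains i) = ((i == nl) || (d.contains i && !(i == loc))) := by
  rw [PySem.Dict.contains_insert, pv_contains_erase]

theorem pv_mem_insertSorted (l : List Int) (x a : Int) :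
    a ∈ pvInsertSorted l x ↔ a = x ∨ a ∈ l := by
  induction l with
  | nil => simp [pvInsertSorted]
  | cons y t ih =>
    by_cases h : y < x
    · simp only [pvInsertSorted, if_pos h, List.mem_cons, ih]
      tauto
    · simp only [pvInsertSorted, if_neg h, List.mem_cons]

theorem pv_pairwise_insertSorted (l : List Int) (x : Int) (hl : l.Pairwise (· < ·)) (hx : x ∉ l) :
    (pvInsertSorted l x).Pairwise (· < ·) := by
  induction l with
  | nil => simp [pvInsertSorted]
  | cons y t ih =>
    have hyt := (List.pairwise_cons.1 hl).1
    have ht := (List.pairwise_cons.1 hl).2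
    have hxy : x ≠ y := fun h => hx (h ▸ List.mem_cons_self ..)
    have hxt : x ∉ t := fun h => hx (List.mem_cons_of_mem _ h)
    by_cases h : y < x
    · simp only [pvInsertSorted, if_pos h]
      refine List.pairwise_cons.2 ⟨?_, ih ht hxt⟩
      intro z hz
      rcases (pv_mem_insertSorted t x z).1 hz with rfl | hz'
      · exact h
      · exact hyt _ hz'
    · simp only [pvInsertSorted, if_neg h]
      refine List.pairwise_cons.2 ⟨?_, hl⟩
      intro z hz
      rcases List.mem_cons.1 hz with rfl | hz'
      · omega
      · have := hyt _ hz'; omega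

theorem pv_scan_spec (orig : PySem.Set Int) (max_loc ptr : Int) :
    ptr ≤ pvScan orig max_loc ptr ∧
    (∀ j : Int, ptr ≤ j → j < pvScan orig max_loc ptr → PySem.Set.contains orig j = true) ∧
    (pvScan orig max_loc ptr < max_loc → PySem.Set.contains orig (pvScan orig max_loc ptr) = false) := by
  rw [pvScan]
  split
  · next h =>
    obtain ⟨h1, h2⟩ := h
    obtain ⟨ih1, ih2, ih3⟩ := pv_scan_spec orig max_loc (ptr + 1)
    refine ⟨by omega, ?_, ih3⟩
    intro j hj1 hj2
    by_cases hje : j = ptr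
    · subst hje; exact h2
    · exact ih2 j (by omega) hj2
  · next h =>
    refine ⟨le_refl _, ?_, ?_⟩
    · intro j hj1 hj2
      exact absurd (hj1.trans_lt hj2) (lt_irrefl ptr)
    · intro hlt
      cases hc : PySem.Set.contains orig ptr with
      | false => rfl
      | true => exact absurd ⟨hlt, hc⟩ h
termination_by (max_loc - ptr).toNat
decreasing_by omega

theorem pv_find_from (a b : Int) (p : Int → Bool) (m : Int) (h1 : a ≤ m) (h2 : m < b)
    (hp : p m = true) (hmin : ∀ j : Int, a ≤ j → j < m → p j = false) :
    (PySem.List.pyRange a b 1).find? p = some m := by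
  rw [PySem.List.pyRange_one_cons (by omega : a < b)]
  by_cases ham : a = m
  · subst ham
    rw [List.find?_cons, hp]
  · have hpa : p a = false := hmin a (le_refl a) (by omega)
    rw [List.find?_cons, hpa]
    show (PySem.List.pyRange (a + 1) b 1).find? p = some m
    exact pv_find_from (a + 1) b p m (by omega) h2 hp (fun j hj1 hj2 => hmin j (by omega) hj2)
termination_by (b - a).toNat
decreasing_by omega

theorem pv_gfsl_eq_some (d : PySem.Dict Int Int) (max_loc m : Int) (h0 : 0 ≤ m) (hb : m < max_loc)
    (hfree : d.contains m = false) (hmin : ∀ j : Int, 0 ≤ j → j < m → d.contains j = true) :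
    pvGetFreeSpaceLoc d max_loc = m := by
  unfold pvGetFreeSpaceLoc
  rw [pv_find_from 0 max_loc _ m h0 hb (by simp [hfree]) (fun j hj1 hj2 => by simp [hmin j hj1 hj2])]

theorem pv_gfsl_eq_none (d : PySem.Dict Int Int) (max_loc : Int)
    (hall : ∀ j : Int, 0 ≤ j → j < max_loc → d.contains j = true) :
    pvGetFreeSpaceLoc d max_loc = max_loc + 1 := by
  unfold pvGetFreeSpaceLoc
  rw [List.find?_eq_none.2 (fun x hx => by
    have := PySem.List.mem_pyRange_one.1 hx
    simp [hall x this.1 this.2])]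

-- invariant preservation, generic in the chosen slot / new pointer / intermediate vacated list
theorem pv_inv_step (orig : List Int) (max_loc fid : Int) (d : PySem.Dict Int Int)
    (ptr' new_loc loc : Int) (vacmid : List Int)
    (hloc : d.contains loc = true) (hlocorig : loc ∈ orig)
    (h1 : vacmid.Pairwise (· < ·))
    (h2 : ∀ v ∈ vacmid, 0 ≤ v ∧ v < max_loc ∧ d.contains v = false ∧ v ∈ orig ∧ v ≠ new_loc)
    (h3 : ∀ i : Int, 0 ≤ i → i < max_loc → d.contains i = false → i ∈ orig → i ≠ new_loc → i ∈ vacmid)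
    (h4 : 0 ≤ ptr')
    (h5 : ∀ i : Int, 0 ≤ i → i < max_loc → d.contains i = false → i ∉ orig → i ≠ new_loc → ptr' ≤ i)
    (h6 : ∀ i : Int, ptr' ≤ i → i < max_loc → i ∉ orig → i ≠ new_loc ∧ d.contains i = false)
    (hnl : max_loc < new_loc ∨ d.contains new_loc = false) :
    pvInv orig max_loc ((d.erase loc).insert new_loc fid) ptr'
      (if 0 ≤ loc ∧ loc < max_loc then pvInsertSorted vacmid loc else vacmid) := by
  have hfree' : ∀ i : Int, ((((d.erase loc).insert new_loc fid).contains i) = false) ↔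
      (i ≠ new_loc ∧ (d.contains i = false ∨ i = loc)) := by
    intro i
    rw [pv_contains_step d loc new_loc fid i]
    cases hni : (i == new_loc) <;> cases hci : d.contains i <;> cases hli : (i == loc) <;>
      simp only [Bool.false_or, Bool.true_or, Bool.or_true, Bool.or_false, Bool.true_and,
        Bool.false_and, Bool.not_true, Bool.not_false] <;>
      simp [beq_iff_eq] at hni hli ⊢ <;> tauto
  have hlocnl : loc < max_loc → loc ≠ new_loc := by
    intro hr he
    rcases hnl with h | h
    · omega
    · rw [he] at hloc; rw [hloc] at h; cases h
  have hlocvac : loc ∉ vacmid := by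
    intro h
    have := (h2 loc h).2.2.1
    rw [hloc] at this; cases this
  refine ⟨?_, ?_, ?_, ?_, ?_, h4⟩
  · -- pairwise
    split
    · exact pv_pairwise_insertSorted vacmid loc h1 hlocvac
    · exact h1
  · -- vac members
    intro v hv
    have hv' : v = loc ∧ (0 ≤ loc ∧ loc < max_loc) ∨ v ∈ vacmid := by
      by_cases hr : 0 ≤ loc ∧ loc < max_loc
      · rw [if_pos hr] at hv
        rcases (pv_mem_insertSorted vacmid loc v).1 hv with rfl | hm
        · exact Or.inl ⟨rfl, hr⟩
        · exact Or.inr hm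
      · rw [if_neg hr] at hv
        exact Or.inr hv
    rcases hv' with ⟨rfl, hr⟩ | hm
    · exact ⟨hr.1, hr.2, (hfree' v).2 ⟨hlocnl hr.2, Or.inr rfl⟩, hlocorig⟩
    · obtain ⟨hb0, hb1, hf, ho, hne⟩ := h2 v hm
      exact ⟨hb0, hb1, (hfree' v).2 ⟨hne, Or.inl hf⟩, ho⟩
  · -- free non-original is at or after the pointer
    intro i hi0 hi1 hfr hno
    obtain ⟨hne, hor⟩ := (hfree' i).1 hfr
    rcases hor with hf | rfl
    · exact h5 i hi0 hi1 hf hno hne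
    · exact absurd hlocorig hno
  · -- free original slots are recorded in vac
    intro i hi0 hi1 hfr ho
    obtain ⟨hne, hor⟩ := (hfree' i).1 hfr
    rcases hor with hf | rfl
    · have := h3 i hi0 hi1 hf ho hne
      split
      · exact (pv_mem_insertSorted _ _ _).2 (Or.inr this)
      · exact this
    · rw [if_pos ⟨hi0, hi1⟩]
      exact (pv_mem_insertSorted _ _ _).2 (Or.inl rfl)
  · -- everything at or after the pointer and non-original is free
    intro i hp hi1 hno
    obtain ⟨hne, hf⟩ := h6 i hp hi1 hno
    exact (hfree' i).2 ⟨hne, Or.inl hf⟩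

theorem pv_stepB_eq (fid max_loc : Int) (orig : List Int) (d : PySem.Dict Int Int)
    (ptr : Int) (vac : List Int) (loc : Int)
    (hInv : pvInv orig max_loc d ptr vac)
    (hloc : d.contains loc = true) (hlocorig : loc ∈ orig) :
    ∃ ptr' vac',
      pvStepB fid max_loc (PySem.Set.ofList orig) (d, ptr, vac) loc
        = (pvStepA fid max_loc d loc, ptr', vac')
      ∧ pvInv orig max_loc (pvStepA fid max_loc d loc) ptr' vac' := by
  obtain ⟨hI1, hI2, hI3, hI4, hI5, hI6⟩ := hInv
  obtain ⟨hr1, hr2, hr3⟩ := pv_scan_spec (PySem.Set.ofList orig) max_loc ptr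
  set r := pvScan (PySem.Set.ofList orig) max_loc ptr with hrdef
  have hr2' : ∀ j : Int, ptr ≤ j → j < r → j ∈ orig :=
    fun j a b => (pv_set_contains orig j).1 (hr2 j a b)
  have hr3' : r < max_loc → r ∉ orig := by
    intro h hm
    rw [(pv_set_contains orig r).2 hm] at hr3
    exact absurd (hr3 h) (by simp)
  have hr0 : 0 ≤ r := le_trans hI6 hr1
  have hfree_ge : ∀ i : Int, 0 ≤ i → i < max_loc → d.contains i = false → i ∉ orig → r ≤ i := by
    intro i hi0 hi1 hf hno
    have hpi := hI3 i hi0 hi1 hf hno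
    by_contra hlt
    exact hno (hr2' i hpi (by omega))
  have hfreechar : ∀ j : Int, 0 ≤ j → j < max_loc → d.contains j = false →
      (j ∈ vac ∨ (j ∉ orig ∧ r ≤ j)) := by
    intro j h0 h1 hf
    by_cases ho : j ∈ orig
    · exact Or.inl (hI4 j h0 h1 hf ho)
    · exact Or.inr ⟨ho, hfree_ge j h0 h1 hf ho⟩
  have hrfree : r < max_loc → d.contains r = false := fun h => hI5 r hr1 h (hr3' h)
  cases vac with
  | cons v rest =>
    obtain ⟨hv0, hv1, hvfree, hvorig⟩ := hI2 v (by simp)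
    have hvmin : ∀ w ∈ rest, v < w := (List.pairwise_cons.1 hI1).1
    by_cases hrm : r < max_loc
    · have hrv : r ≠ v := fun he => (hr3' hrm) (he ▸ hvorig)
      by_cases hvr : v < r
      · -- take the head of vac
        have hgfsl : pvGetFreeSpaceLoc d max_loc = v := by
          apply pv_gfsl_eq_some d max_loc v hv0 hv1 hvfree
          intro j hj0 hj1
          cases hcj : d.contains j with
          | true => rfl
          | false =>
            rcases hfreechar j hj0 (by omega) hcj with hm | ⟨_, hge⟩
            · rcases List.mem_cons.1 hm with rfl | hm'
              · omega
              · have := hvmin j hm'; omega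
            · omega
        refine ⟨r, (if 0 ≤ loc ∧ loc < max_loc then pvInsertSorted rest loc else rest), ?_, ?_⟩
        · simp only [pvStepB, pvStepA, ← hrdef, if_pos hrm, if_pos hvr, hgfsl]
        · simp only [pvStepA, hgfsl]
          apply pv_inv_step orig max_loc fid d r v loc rest hloc hlocorig
            ((List.pairwise_cons.1 hI1).2)
          · intro w hw
            obtain ⟨a, b, c, e⟩ := hI2 w (List.mem_cons_of_mem _ hw)
            exact ⟨a, b, c, e, fun he => absurd (he ▸ hvmin w hw) (lt_irrefl v)⟩
          · intro i hi0 hi1 hf ho hne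
            rcases List.mem_cons.1 (hI4 i hi0 hi1 hf ho) with rfl | hm
            · exact absurd rfl hne
            · exact hm
          · exact hr0
          · intro i hi0 hi1 hf hno _
            exact hfree_ge i hi0 hi1 hf hno
          · intro i hpi hi1 hno
            exact ⟨fun he => hno (he ▸ hvorig), hI5 i (le_trans hr1 hpi) hi1 hno⟩
          · exact Or.inr hvfree
      · -- take the scan candidate
        have hrv' : r < v := by omega
        have hgfsl : pvGetFreeSpaceLoc d max_loc = r := by
          apply pv_gfsl_eq_some d max_loc r hr0 hrm (hrfree hrm)
          intro j hj0 hj1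
          cases hcj : d.contains j with
          | true => rfl
          | false =>
            rcases hfreechar j hj0 (by omega) hcj with hm | ⟨_, hge⟩
            · rcases List.mem_cons.1 hm with rfl | hm'
              · omega
              · have := hvmin j hm'; omega
            · omega
        refine ⟨r + 1, (if 0 ≤ loc ∧ loc < max_loc then pvInsertSorted (v :: rest) loc else v :: rest), ?_, ?_⟩
        · simp only [pvStepB, pvStepA, ← hrdef, if_pos hrm, if_neg hvr, hgfsl]
        · simp only [pvStepA, hgfsl]
          apply pv_inv_step orig max_loc fid d (r + 1) r loc (v :: rest) hloc hlocorig hI1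
          · intro w hw
            obtain ⟨a, b, c, e⟩ := hI2 w hw
            exact ⟨a, b, c, e, fun he => (hr3' hrm) (he ▸ e)⟩
          · intro i hi0 hi1 hf ho _
            exact hI4 i hi0 hi1 hf ho
          · omega
          · intro i hi0 hi1 hf hno hne
            have := hfree_ge i hi0 hi1 hf hno
            omega
          · intro i hpi hi1 hno
            exact ⟨by omega, hI5 i (by omega) hi1 hno⟩
          · exact Or.inr (hrfree hrm)
    · -- no candidate in range: take the head of vac
      have hgfsl : pvGetFreeSpaceLoc d max_loc = v := by
        apply pv_gfsl_eq_some d max_loc v hv0 hv1 hvfree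
        intro j hj0 hj1
        cases hcj : d.contains j with
        | true => rfl
        | false =>
          rcases hfreechar j hj0 (by omega) hcj with hm | ⟨_, hge⟩
          · rcases List.mem_cons.1 hm with rfl | hm'
            · omega
            · have := hvmin j hm'; omega
          · omega
      refine ⟨r, (if 0 ≤ loc ∧ loc < max_loc then pvInsertSorted rest loc else rest), ?_, ?_⟩
      · simp only [pvStepB, pvStepA, ← hrdef, if_neg hrm, hgfsl]
      · simp only [pvStepA, hgfsl]
        apply pv_inv_step orig max_loc fid d r v loc rest hloc hlocorig
          ((List.pairwise_cons.1 hI1).2)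
        · intro w hw
          obtain ⟨a, b, c, e⟩ := hI2 w (List.mem_cons_of_mem _ hw)
          exact ⟨a, b, c, e, fun he => absurd (he ▸ hvmin w hw) (lt_irrefl v)⟩
        · intro i hi0 hi1 hf ho hne
          rcases List.mem_cons.1 (hI4 i hi0 hi1 hf ho) with rfl | hm
          · exact absurd rfl hne
          · exact hm
        · exact hr0
        · intro i hi0 hi1 hf hno _
          exact hfree_ge i hi0 hi1 hf hno
        · intro i hpi hi1 hno
          exact absurd hi1 (by omega)
        · exact Or.inr hvfree
  | nil =>
    by_cases hrm : r < max_loc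
    · -- take the scan candidate
      have hgfsl : pvGetFreeSpaceLoc d max_loc = r := by
        apply pv_gfsl_eq_some d max_loc r hr0 hrm (hrfree hrm)
        intro j hj0 hj1
        cases hcj : d.contains j with
        | true => rfl
        | false =>
          rcases hfreechar j hj0 (by omega) hcj with hm | ⟨_, hge⟩
          · exact absurd hm (List.not_mem_nil)
          · omega
      refine ⟨r + 1, (if 0 ≤ loc ∧ loc < max_loc then pvInsertSorted [] loc else []), ?_, ?_⟩
      · simp only [pvStepB, pvStepA, ← hrdef, if_pos hrm, hgfsl]
      · simp only [pvStepA, hgfsl]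
        apply pv_inv_step orig max_loc fid d (r + 1) r loc [] hloc hlocorig List.Pairwise.nil
        · intro w hw
          exact absurd hw (List.not_mem_nil)
        · intro i hi0 hi1 hf ho _
          exact absurd (hI4 i hi0 hi1 hf ho) (List.not_mem_nil)
        · omega
        · intro i hi0 hi1 hf hno hne
          have := hfree_ge i hi0 hi1 hf hno
          omega
        · intro i hpi hi1 hno
          exact ⟨by omega, hI5 i (by omega) hi1 hno⟩
        · exact Or.inr (hrfree hrm)
    · -- nothing free at all
      have hgfsl : pvGetFreeSpaceLoc d max_loc = max_loc + 1 := by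
        apply pv_gfsl_eq_none
        intro j hj0 hj1
        cases hcj : d.contains j with
        | true => rfl
        | false =>
          rcases hfreechar j hj0 hj1 hcj with hm | ⟨_, hge⟩
          · exact absurd hm (List.not_mem_nil)
          · omega
      refine ⟨r, (if 0 ≤ loc ∧ loc < max_loc then pvInsertSorted [] loc else []), ?_, ?_⟩
      · simp only [pvStepB, pvStepA, ← hrdef, if_neg hrm, hgfsl]
      · simp only [pvStepA, hgfsl]
        apply pv_inv_step orig max_loc fid d r (max_loc + 1) loc [] hloc hlocorig List.Pairwise.nil
        · intro w hw
          exact absurd hw (List.not_mem_nil)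
        · intro i hi0 hi1 hf ho _
          exact absurd (hI4 i hi0 hi1 hf ho) (List.not_mem_nil)
        · exact hr0
        · intro i hi0 hi1 hf hno _
          exact hfree_ge i hi0 hi1 hf hno
        · intro i hpi hi1 hno
          exact ⟨by omega, hI5 i (le_trans hr1 hpi) hi1 hno⟩
        · exact Or.inl (by omega)

theorem pv_fold_eq (fid max_loc : Int) (orig : List Int) (locs : List Int)
    (d : PySem.Dict Int Int) (ptr : Int) (vac : List Int)
    (hInv : pvInv orig max_loc d ptr vac)
    (hmem : ∀ l ∈ locs, d.contains l = true ∧ l ∈ orig) (hnd : locs.Nodup) :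
    (locs.foldl (pvStepB fid max_loc (PySem.Set.ofList orig)) (d, ptr, vac)).1
      = locs.foldl (pvStepA fid max_loc) d := by
  induction locs generalizing d ptr vac with
  | nil => rfl
  | cons loc t ih =>
    obtain ⟨hloc, hlocorig⟩ := hmem loc (by simp)
    obtain ⟨ptr', vac', heq, hInv'⟩ :=
      pv_stepB_eq fid max_loc orig d ptr vac loc hInv hloc hlocorig
    simp only [List.foldl_cons, heq]
    apply ih _ _ _ hInv'
    · intro l hl
      have hne : l ≠ loc := fun h => (List.nodup_cons.1 hnd).1 (h ▸ hl)
      obtain ⟨hcl, hol⟩ := hmem l (List.mem_cons_of_mem _ hl)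
      refine ⟨?_, hol⟩
      simp only [pvStepA]
      rw [pv_contains_step]
      simp [hcl, beq_iff_eq, hne]
    · exact (List.nodup_cons.1 hnd).2

theorem pv_locs_eq (fid : Int) (disk_map : List (Int × Int)) (hnd : (disk_map.map Prod.fst).Nodup) :
    (PySem.Dict.mk disk_map).keys.foldl
        (fun acc loc => if (PySem.Dict.mk disk_map).getD loc 0 == fid then acc ++ [loc] else acc) []
      = ((PySem.Dict.mk disk_map).items.filter (fun p => p.2 == fid)).map (fun p => p.1) := by
  rw [PySem.List.foldl_append_if (p := fun loc => (PySem.Dict.mk disk_map).getD loc 0 == fid)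
    (f := fun loc => loc)]
  simp only [List.nil_append, List.map_id']
  have hkeys : (PySem.Dict.mk disk_map).keys = disk_map.map Prod.fst := rfl
  rw [hkeys, List.filter_map]
  have : disk_map.filter ((fun loc => (PySem.Dict.mk disk_map).getD loc 0 == fid) ∘ Prod.fst)
      = disk_map.filter (fun p => p.2 == fid) := by
    apply List.filter_congr
    intro p hp
    have : (PySem.Dict.mk disk_map).getD p.1 0 = p.2 := by
      apply PySem.Dict.getD_of_mem_items
      · exact hp
      · exact hnd
    simp [Function.comp, this]
  rw [this]

-- ===== VERDICT (by name: the statement is the Claim_ definition above) =====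
theorem move_file_id_spec : Claim_equal_move_file_id := by
  intro file_id disk_map max_loc _hdom hpre
  obtain ⟨hne, hnd⟩ := hpre
  unfold Spec_move_file_id move_file_id move_file_id_alt
  simp only
  rw [← pv_locs_eq file_id disk_map hnd]
  set d0 : PySem.Dict Int Int := PySem.Dict.mk disk_map with hd0
  set locs : List Int :=
    d0.keys.foldl (fun acc loc => if d0.getD loc 0 == file_id then acc ++ [loc] else acc) []
    with hlocs
  have hlocs2 : locs = ((d0.items.filter (fun p => p.2 == file_id)).map (fun p => p.1)) := by
    rw [hlocs, hd0, pv_locs_eq file_id disk_map hnd]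
  have hsub : locs.Sublist d0.keys := by
    rw [hlocs2]
    have : (d0.items.filter (fun p => p.2 == file_id)).Sublist d0.items := List.filter_sublist
    exact this.map Prod.fst
  have hndlocs : locs.Nodup := hsub.nodup hnd
  have hmem : ∀ l ∈ locs, d0.contains l = true ∧ l ∈ d0.keys := by
    intro l hl
    exact ⟨(PySem.Dict.contains_iff_mem_keys d0 l).2 (hsub.mem hl), hsub.mem hl⟩
  have hInv0 : pvInv d0.keys max_loc d0 0 [] := by
    refine ⟨List.Pairwise.nil, ?_, ?_, ?_, ?_, le_refl 0⟩
    · intro v hv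
      exact absurd hv (List.not_mem_nil)
    · intro i hi0 _ _ _
      exact hi0
    · intro i _ _ hf ho
      rw [(PySem.Dict.contains_iff_mem_keys d0 i).2 ho] at hf
      cases hf
    · intro i _ _ hno
      cases hc : d0.contains i with
      | true => exact absurd ((PySem.Dict.contains_iff_mem_keys d0 i).1 hc) hno
      | false => rfl
  have hfold := pv_fold_eq file_id max_loc d0.keys locs d0 0 [] hInv0 hmem hndlocs
  have hfoldfun : (fun (d : PySem.Dict Int Int) loc =>
      let new_loc := pvGetFreeSpaceLoc d max_loc
      (d.erase loc).insert new_loc file_id) = pvStepA file_id max_loc := rfl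
  rw [hfoldfun, ← hfold]
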